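-- pv_equiv track=rewrite | github.com/kytos/kytos | kytos/core/tag_ranges.py | range_difference
-- ===== SOURCE A (Python) =====
-- from copy import deepcopy
-- from typing import Iterator, Optional, Union
--
-- def range_difference(
--     ranges_a: list[Optional[list[int]]],
--     ranges_b: list[Optional[list[int]]]
-- ) -> list[list[int]]:
--     """The operation is two validated list of ranges
--      (ranges_a - ranges_b).
--     This method simulates difference of sets.
--
--     Necessities:
--         The lists from argument need to be ordered and validated.
--         E.g. [[1, 2], [4, 60]]
--         Use get_tag_ranges() for list[list[int]] or
--             get_validated_tags() for also list[int]
--     """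
--     if not ranges_a:
--         return []
--     if not ranges_b:
--         return deepcopy(ranges_a)
--     result = []
--     a_i, b_i = 0, 0
--     update = True
--     while a_i < len(ranges_a) and b_i < len(ranges_b):
--         if update:
--             start_a, end_a = ranges_a[a_i]
--         else:
--             update = True
--         start_b, end_b = ranges_b[b_i]
--         # Moving forward with non-intersection
--         if end_a < start_b:
--             result.append([start_a, end_a])
--             a_i += 1
--         elif end_b < start_a:
--             b_i += 1
--         else:
--             # Intersection
--             if start_a < start_b:
--                 result.append([start_a, start_b - 1])
--             if end_a > end_b:
--                 start_a = end_b + 1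
--                 update = False
--                 b_i += 1
--             else:
--                 a_i += 1
--     # Append last intersection and the rest of ranges_a
--     while a_i < len(ranges_a):
--         if update:
--             start_a, end_a = ranges_a[a_i]
--         else:
--             update = True
--         result.append([start_a, end_a])
--         a_i += 1
--     return result
-- ===== SOURCE B (Python) =====
-- from copy import deepcopy
--
--
-- def range_difference(ranges_a, ranges_b):
--     """ranges_a - ranges_b for validated, sorted interval lists.
--
--     Reworked as a worklist rewriting: both lists become stacks; the top
--     a-interval is compared with the top b-interval and either emitted,
--     trimmed (its remainder pushed back as a fresh interval), or dropped,
--     until one stack runs out; no indices, no update flag.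
--     """
--     if not ranges_a:
--         return []
--     if not ranges_b:
--         return deepcopy(ranges_a)
--     result = []
--     todo = [[start, end] for start, end in reversed(ranges_a)]
--     rest = list(reversed(ranges_b))
--     while todo and rest:
--         start_a, end_a = todo[-1]
--         start_b, end_b = rest[-1]
--         if end_a < start_b:
--             result.append(todo.pop())
--         elif end_b < start_a:
--             rest.pop()
--         else:
--             if start_a < start_b:
--                 result.append([start_a, start_b - 1])
--             if end_a > end_b:
--                 todo[-1] = [end_b + 1, end_a]
--                 rest.pop()
--             else:
--                 todo.pop()
--     result.extend(reversed(todo))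
--     return result
-- ===== Notes on version B (the rewrite author's own statement) =====
-- stated objective: simpler
-- what changed: A's two-index state machine (while-loop with an 'update' flag, mutable start_a/end_a locals and a second trailing loop) becomes one worklist loop over two explicit stacks: the top a-interval is emitted, dropped, or trimmed with its remainder pushed back as data, and the leftover stack is flushed with a single extend; the flag, both indices and the trailing loop disappear.
-- outside the precondition, e.g. on range_difference([[1, 2]], [[1, 2], [3]]): A returns [], B returns []; on range_difference([[1, 10]], [[5, 6], [1, 2]]): A returns [[1, 4], [1, 10]], B returns [[1, 4], [7, 10]]
import Mathlib
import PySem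

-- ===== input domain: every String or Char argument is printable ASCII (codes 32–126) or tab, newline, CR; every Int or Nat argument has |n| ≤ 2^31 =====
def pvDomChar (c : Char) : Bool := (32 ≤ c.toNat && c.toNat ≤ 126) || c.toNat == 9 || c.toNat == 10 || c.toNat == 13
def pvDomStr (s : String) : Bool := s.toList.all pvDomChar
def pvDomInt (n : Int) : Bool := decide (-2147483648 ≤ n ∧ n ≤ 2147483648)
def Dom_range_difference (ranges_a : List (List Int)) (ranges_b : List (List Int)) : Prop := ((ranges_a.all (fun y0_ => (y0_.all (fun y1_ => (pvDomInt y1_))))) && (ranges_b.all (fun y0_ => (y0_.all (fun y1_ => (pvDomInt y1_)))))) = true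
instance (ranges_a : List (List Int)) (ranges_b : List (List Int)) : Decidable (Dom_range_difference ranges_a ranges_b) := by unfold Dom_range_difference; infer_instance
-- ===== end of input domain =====

-- B replaces A's two-index while-loop machine (update flag, mutable start_a/end_a,
-- second trailing loop) by one worklist loop over two explicit stacks in which a
-- trimmed a-interval's remainder is pushed back as data; simpler, same cost.

-- ===== PORT A =====
-- Python's `start_a, end_a = l` unpacking; exact where l is a two-element list
-- (Pre_ guarantees this wherever A reads an entry; Python raises ValueError otherwise).
def pvPair (l : List Int) : Int × Int :=
  match l with
  | [s, e] => (s, e)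
  | _ => (0, 0)

-- A's trailing `while a_i < len(ranges_a)` loop
def rdTailA (ra : List (List Int)) (a_i : Nat) (update : Bool) (sa ea : Int)
    (res : List (List Int)) : List (List Int) :=
  if _h : a_i < ra.length then
    let p := if update then pvPair (ra.getD a_i []) else (sa, ea)
    rdTailA ra (a_i + 1) true p.1 p.2 (res ++ [[p.1, p.2]])
  else res
termination_by ra.length - a_i
decreasing_by exact Nat.sub_succ_lt_self _ _ _h

-- A's main `while a_i < len(ranges_a) and b_i < len(ranges_b)` loop
def rdLoopA (ra rb : List (List Int)) (a_i b_i : Nat) (update : Bool) (sa ea : Int)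
    (res : List (List Int)) : List (List Int) :=
  if h : a_i < ra.length ∧ b_i < rb.length then
    let p := if update then pvPair (ra.getD a_i []) else (sa, ea)
    let q := pvPair (rb.getD b_i [])
    if p.2 < q.1 then
      rdLoopA ra rb (a_i + 1) b_i true p.1 p.2 (res ++ [[p.1, p.2]])
    else if q.2 < p.1 then
      rdLoopA ra rb a_i (b_i + 1) true p.1 p.2 res
    else
      let res' := if p.1 < q.1 then res ++ [[p.1, q.1 - 1]] else res
      if p.2 > q.2 then
        rdLoopA ra rb a_i (b_i + 1) false (q.2 + 1) p.2 res'
      else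
        rdLoopA ra rb (a_i + 1) b_i true p.1 p.2 res'
  else
    rdTailA ra a_i update sa ea res
termination_by (ra.length - a_i) + (rb.length - b_i)
decreasing_by
  · exact Nat.add_lt_add_right (Nat.sub_succ_lt_self _ _ h.1) _
  · exact Nat.add_lt_add_left (Nat.sub_succ_lt_self _ _ h.2) _
  · exact Nat.add_lt_add_left (Nat.sub_succ_lt_self _ _ h.2) _
  · exact Nat.add_lt_add_right (Nat.sub_succ_lt_self _ _ h.1) _

def range_difference (ranges_a : List (List Int)) (ranges_b : List (List Int)) : List (List Int) :=
  if ranges_a = [] then []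
  else if ranges_b = [] then ranges_a     -- deepcopy: value-equal
  else rdLoopA ranges_a ranges_b 0 0 true 0 0 []   -- start_a/end_a unset in Python; update=True so the dummies are never read

-- ===== PORT B =====
-- B's `start, end = …` unpacking (same convention as pvPair)
def pvPairB (l : List Int) : Int × Int :=
  match l with
  | [s, e] => (s, e)
  | _ => (0, 0)

-- B's `while todo and rest` worklist loop; Python keeps the stack tops at the END
-- of its reversed lists (todo[-1] / pop / push), ported as the HEAD of the
-- un-reversed lists; the final `result.extend(reversed(todo))` is `res ++ todo`.
def rdLoopB : List (List Int) → List (List Int) → List (List Int) → List (List Int)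
  | ta :: ts, tb :: bs, res =>
    let p := pvPairB ta
    let q := pvPairB tb
    if p.2 < q.1 then rdLoopB ts (tb :: bs) (res ++ [ta])
    else if q.2 < p.1 then rdLoopB (ta :: ts) bs res
    else
      let res' := if p.1 < q.1 then res ++ [[p.1, q.1 - 1]] else res
      if p.2 > q.2 then rdLoopB ([q.2 + 1, p.2] :: ts) bs res'
      else rdLoopB ts (tb :: bs) res'
  | todo, _, res => res ++ todo
termination_by todo rest _ => todo.length + rest.length

def range_difference_alt (ranges_a : List (List Int)) (ranges_b : List (List Int)) : List (List Int) :=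
  if ranges_a = [] then []
  else if ranges_b = [] then ranges_a
  else rdLoopB (ranges_a.map (fun l => [(pvPairB l).1, (pvPairB l).2])) ranges_b []
    -- `[[start, end] for start, end in reversed(ranges_a)]` / `list(reversed(ranges_b))`

-- ===== PRECONDITION & SPEC =====
-- A's docstring requires ordered, validated [start, end] pairs.  Pre_ excludes
-- exactly (1) entries that are not two-element lists — A raises ValueError when its
-- sweep reads one, and returns only on the inputs where it happens never to read it
-- (there B returns the same value, see cites) — and (2) non-empty b-lists whose
-- interval ends are not strictly increasing: unvalidated input on which A's value is
-- an accident of its update-flag (after trimming an a-interval it revives the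
-- original, un-trimmed bounds) while B keeps the trimmed remainder; neither value is
-- specified, see cites.  (With an empty argument A reads no entries, so such inputs
-- stay inside Pre_.)
def allPairs (l : List (List Int)) : Prop := ∀ x ∈ l, x.length = 2

def Pre_range_difference (ranges_a : List (List Int)) (ranges_b : List (List Int)) : Prop :=
  ranges_a = [] ∨ ranges_b = [] ∨
    (allPairs ranges_a ∧ allPairs ranges_b ∧
      List.IsChain (fun x y => x.getD 1 0 < y.getD 1 0) ranges_b)

instance (ranges_a : List (List Int)) (ranges_b : List (List Int)) : Decidable (Pre_range_difference ranges_a ranges_b) := by unfold Pre_range_difference allPairs; infer_instance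

def pvWitness_range_difference : List (List Int) × List (List Int) := ([[1, 2], [4, 10]], [[2, 5]])

def Spec_range_difference (ranges_a : List (List Int)) (ranges_b : List (List Int)) (out : List (List Int)) : Prop := out = range_difference_alt ranges_a ranges_b
instance (ranges_a : List (List Int)) (ranges_b : List (List Int)) (out : List (List Int)) : Decidable (Spec_range_difference ranges_a ranges_b out) := by unfold Spec_range_difference; infer_instance

-- ===== CLAIM (what is proved, stated in full; the proofs are below) =====
def Claim_equal_range_difference : Prop := ∀ (ranges_a : List (List Int)) (ranges_b : List (List Int)), Dom_range_difference ranges_a ranges_b → Pre_range_difference ranges_a ranges_b → Spec_range_difference ranges_a ranges_b (range_difference ranges_a ranges_b)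

-- ===== LEMMAS AND PROOFS =====

-- start / end of the i-th interval
def sIdx (l : List (List Int)) (i : Nat) : Int := (pvPair (l.getD i [])).1
def eIdx (l : List (List Int)) (i : Nat) : Int := (pvPair (l.getD i [])).2

lemma exists_pair {x : List Int} (h : x.length = 2) : ∃ a b, x = [a, b] := by
  rcases x with _ | ⟨a, _ | ⟨b, _ | ⟨c, t⟩⟩⟩ <;> simp_all

lemma pair_entry {l : List (List Int)} (h : allPairs l) {i : Nat} (hi : i < l.length) :
    l.getD i [] = [sIdx l i, eIdx l i] := by
  have hm : l.getD i [] ∈ l := by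
    rw [List.getD_eq_getElem l [] hi]; exact List.getElem_mem hi
  obtain ⟨a, b, hx⟩ := exists_pair (h _ hm)
  have hs : sIdx l i = a := by show (pvPair (l.getD i [])).1 = a; rw [hx]; rfl
  have he : eIdx l i = b := by show (pvPair (l.getD i [])).2 = b; rw [hx]; rfl
  rw [hs, he, hx]

lemma ends_adj {l : List (List Int)} (hp : allPairs l)
    (h : List.IsChain (fun x y => x.getD 1 0 < y.getD 1 0) l) {i : Nat}
    (hi : i + 1 < l.length) : eIdx l i < eIdx l (i + 1) := by
  have hc := List.isChain_iff_getElem.mp h i hi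
  have h1 := pair_entry hp (Nat.lt_of_succ_lt hi)
  have h2 := pair_entry hp hi
  rw [List.getD_eq_getElem l [] (Nat.lt_of_succ_lt hi)] at h1
  rw [List.getD_eq_getElem l [] hi] at h2
  rw [h1, h2] at hc
  simpa using hc

lemma drop_cons {l : List (List Int)} {i : Nat} (hi : i < l.length) :
    l.drop i = l.getD i [] :: l.drop (i + 1) := by
  rw [List.getD_eq_getElem l [] hi]
  exact (List.getElem_cons_drop hi).symm

-- re-building every pair (`[[s, e] for s, e in …]`) is the identity on pair lists
lemma map_norm_id {l : List (List Int)} (h : allPairs l) :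
    l.map (fun x => [(pvPairB x).1, (pvPairB x).2]) = l := by
  induction l with
  | nil => rfl
  | cons x rest ih =>
    obtain ⟨a, b, hx⟩ := exists_pair (h x List.mem_cons_self)
    rw [List.map_cons, ih (fun y hy => h y (List.mem_cons_of_mem x hy)), hx]
    rfl

lemma rdLoopB_no_b (todo : List (List Int)) (res : List (List Int)) :
    rdLoopB todo [] res = res ++ todo := by
  cases todo <;> simp [rdLoopB]

lemma rdLoopB_no_a (rest : List (List Int)) (res : List (List Int)) :
    rdLoopB [] rest res = res := by
  cases rest <;> simp [rdLoopB]

-- A's trailing loop copies the rest of ranges_a (re-built pairs = the entries)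
lemma tailA_eq {ra : List (List Int)} (hra : allPairs ra) :
    ∀ (a_i : Nat) (sa ea : Int) (res : List (List Int)),
      rdTailA ra a_i true sa ea res = res ++ ra.drop a_i := by
  have H : ∀ k a_i sa ea res, ra.length - a_i ≤ k →
      rdTailA ra a_i true sa ea res = res ++ ra.drop a_i := by
    intro k
    induction k with
    | zero =>
      intro a_i sa ea res hk
      have ha : ¬ a_i < ra.length := by omega
      rw [rdTailA, dif_neg ha, List.drop_of_length_le (by omega), List.append_nil]
    | succ k ih =>
      intro a_i sa ea res hk
      by_cases ha : a_i < ra.length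
      · rw [rdTailA, dif_pos ha]
        simp only [if_true]
        rw [ih (a_i + 1) _ _ _ (by omega), drop_cons ha, pair_entry hra ha]
        simp [pvPair]
      · rw [rdTailA, dif_neg ha, List.drop_of_length_le (by omega), List.append_nil]
  exact fun a_i sa ea res => H (ra.length - a_i) a_i sa ea res le_rfl

-- the main invariant: A's loop state (a_i, b_i, update, start_a, end_a) corresponds
-- to B's stacks (the trimmed remainder [start_a, end_a] sits on top when update is
-- off); in a trimmed state start_a records the last consumed b-end + 1, which with
-- strictly increasing b-ends rules out A's `end_b < start_a` revival branch.
lemma loop_eq {ra rb : List (List Int)} (hra : allPairs ra) (hrb : allPairs rb)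
    (hch : List.IsChain (fun x y => x.getD 1 0 < y.getD 1 0) rb) :
    ∀ (N a_i b_i : Nat) (update : Bool) (sa ea : Int) (res : List (List Int)),
      (ra.length - a_i) + (rb.length - b_i) ≤ N →
      a_i ≤ ra.length → b_i ≤ rb.length →
      (update = false → a_i < ra.length ∧ 0 < b_i ∧ sa = eIdx rb (b_i - 1) + 1) →
      rdLoopA ra rb a_i b_i update sa ea res
        = rdLoopB (if update then ra.drop a_i else [sa, ea] :: ra.drop (a_i + 1))
            (rb.drop b_i) res := by
  intro N
  induction N with
  | zero =>
    intro a_i b_i update sa ea res hN ha hb hfalse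
    have hae : a_i = ra.length := by
      rcases update with _ | _
      · have := (hfalse rfl).1; omega
      · omega
    have hbe : b_i = rb.length := by omega
    cases update
    · exact absurd (hfalse rfl).1 (by omega)
    · simp only [if_true]
      rw [rdLoopA, dif_neg (by omega), rdTailA, dif_neg (by omega),
        List.drop_of_length_le (le_of_eq hae.symm), List.drop_of_length_le (le_of_eq hbe.symm),
        rdLoopB_no_b, List.append_nil]
  | succ N ih =>
    intro a_i b_i update sa ea res hN ha hb hfalse
    by_cases hal : a_i < ra.length
    · by_cases hbl : b_i < rb.length
      · -- both stacks non-empty: the five branches align one for one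
        have hA : ra.drop a_i = [sIdx ra a_i, eIdx ra a_i] :: ra.drop (a_i + 1) := by
          rw [drop_cons hal, pair_entry hra hal]
        have hB : rb.drop b_i = [sIdx rb b_i, eIdx rb b_i] :: rb.drop (b_i + 1) := by
          rw [drop_cons hbl, pair_entry hrb hbl]
        have hq : pvPair (rb.getD b_i []) = (sIdx rb b_i, eIdx rb b_i) := rfl
        have hpA : pvPair (ra.getD a_i []) = (sIdx ra a_i, eIdx ra a_i) := rfl
        rw [rdLoopA, dif_pos ⟨hal, hbl⟩]
        -- the pair A reads (or keeps) = the pair on top of B's todo stack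
        cases update
        · -- update = False: the trimmed pair [sa, ea] is B's stack top
          obtain ⟨-, hbpos, hsa⟩ := hfalse rfl
          simp only [Bool.false_eq_true, if_false, hq, gt_iff_lt]
          rw [hB, rdLoopB]
          simp only [pvPairB, gt_iff_lt]
          by_cases h1 : ea < sIdx rb b_i
          · rw [if_pos h1, if_pos h1]
            rw [ih (a_i + 1) b_i true sa ea _ (by omega) (by omega) (by omega)
              (by intro h; cases h)]
            rw [if_pos rfl, hB]
          · rw [if_neg h1, if_neg h1]
            by_cases h2 : eIdx rb b_i < sa
            · -- A's revival branch: impossible, b-ends are strictly increasing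
              exfalso
              have hadj : eIdx rb (b_i - 1) < eIdx rb (b_i - 1 + 1) :=
                ends_adj hrb hch (by omega)
              have hb1 : b_i - 1 + 1 = b_i := by omega
              rw [hb1] at hadj
              omega
            · rw [if_neg h2, if_neg h2]
              by_cases h3 : eIdx rb b_i < ea
              · rw [if_pos h3, if_pos h3]
                rw [ih a_i (b_i + 1) false (eIdx rb b_i + 1) ea _ (by omega) (by omega)
                  (by omega) (fun _ => ⟨hal, by omega, by simp⟩)]
                rw [if_neg (by simp)]
              · rw [if_neg h3, if_neg h3]
                rw [ih (a_i + 1) b_i true sa ea _ (by omega) (by omega) (by omega)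
                  (by intro h; cases h)]
                rw [if_pos rfl, hB]
        · -- update = True: A reads ranges_a[a_i] = B's stack top
          simp only [if_true, hq, hpA, gt_iff_lt]
          rw [hA, hB, rdLoopB]
          simp only [pvPairB, gt_iff_lt]
          by_cases h1 : eIdx ra a_i < sIdx rb b_i
          · rw [if_pos h1, if_pos h1]
            rw [ih (a_i + 1) b_i true (sIdx ra a_i) (eIdx ra a_i) _ (by omega) (by omega)
              (by omega) (by intro h; cases h)]
            rw [if_pos rfl, hB]
          · rw [if_neg h1, if_neg h1]
            by_cases h2 : eIdx rb b_i < sIdx ra a_i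
            · rw [if_pos h2, if_pos h2]
              rw [ih a_i (b_i + 1) true (sIdx ra a_i) (eIdx ra a_i) _ (by omega) (by omega)
                (by omega) (by intro h; cases h)]
              rw [if_pos rfl, hA]
            · rw [if_neg h2, if_neg h2]
              by_cases h3 : eIdx rb b_i < eIdx ra a_i
              · rw [if_pos h3, if_pos h3]
                rw [ih a_i (b_i + 1) false (eIdx rb b_i + 1) (eIdx ra a_i) _ (by omega)
                  (by omega) (by omega) (fun _ => ⟨hal, by omega, by simp⟩)]
                rw [if_neg (by simp)]
              · rw [if_neg h3, if_neg h3]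
                rw [ih (a_i + 1) b_i true (sIdx ra a_i) (eIdx ra a_i) _ (by omega)
                  (by omega) (by omega) (by intro h; cases h)]
                rw [if_pos rfl, hB]
      · -- ranges_b exhausted: A's trailing loop = B's final flush of todo
        have hbe : b_i = rb.length := by omega
        rw [rdLoopA, dif_neg (by omega), List.drop_of_length_le (le_of_eq hbe.symm)]
        cases update
        · obtain ⟨-, -, -⟩ := hfalse rfl
          simp only [Bool.false_eq_true, if_false]
          rw [rdTailA, dif_pos hal]
          simp only [Bool.false_eq_true, if_false]
          rw [tailA_eq hra, rdLoopB_no_b]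
          simp
        · simp only [if_true]
          rw [tailA_eq hra, rdLoopB_no_b]
    · -- ranges_a exhausted (update must be True): both sides return res
      have hae : a_i = ra.length := by omega
      cases update
      · exact absurd (hfalse rfl).1 (by omega)
      · simp only [if_true]
        rw [rdLoopA, dif_neg (by omega), rdTailA, dif_neg (by omega),
          List.drop_of_length_le (le_of_eq hae.symm), rdLoopB_no_a]

-- ===== VERDICT (by name: the statement is the Claim_ definition above) =====
theorem range_difference_spec : Claim_equal_range_difference := by
  intro ra rb _hdom hpre
  unfold Spec_range_difference range_difference range_difference_alt
  rcases hpre with h | h | ⟨hra, hrb, hch⟩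
  · simp [h]
  · simp [h]
  · by_cases hA : ra = []
    · simp [hA]
    · by_cases hB : rb = []
      · simp [hA, hB]
      · simp only [hA, hB, if_false]
        rw [loop_eq hra hrb hch (ra.length + rb.length) 0 0 true 0 0 [] (by omega)
          (Nat.zero_le _) (Nat.zero_le _) (by intro h; cases h)]
        rw [if_pos rfl, List.drop_zero, List.drop_zero, map_norm_id hra]
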